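-- pv_equiv track=rewrite | github.com/Daniel45450/resultados_quiniela | app.py | get_cadenas
-- ===== SOURCE A (Python) =====
-- def get_cadenas(palabra):
--     cadenas = []
--     for c in reversed(palabra):
--         if not cadenas:
--             cadenas.append(c)
--         else:
--             cadenas.append(c + cadenas[len(cadenas) -1])
--     return cadenas
-- ===== SOURCE B (Python) =====
-- def get_cadenas(palabra):
--     n = len(palabra)
--     return [palabra[n - 1 - i:] for i in range(n)]
-- ===== Notes on version B (the rewrite author's own statement) =====
-- stated objective: simpler
-- what changed: B computes each element as a direct slice palabra[n-1-i:] of the original string in a comprehension, instead of A's loop over the reversed string that concatenates each character onto the previously built element.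
import Mathlib
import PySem

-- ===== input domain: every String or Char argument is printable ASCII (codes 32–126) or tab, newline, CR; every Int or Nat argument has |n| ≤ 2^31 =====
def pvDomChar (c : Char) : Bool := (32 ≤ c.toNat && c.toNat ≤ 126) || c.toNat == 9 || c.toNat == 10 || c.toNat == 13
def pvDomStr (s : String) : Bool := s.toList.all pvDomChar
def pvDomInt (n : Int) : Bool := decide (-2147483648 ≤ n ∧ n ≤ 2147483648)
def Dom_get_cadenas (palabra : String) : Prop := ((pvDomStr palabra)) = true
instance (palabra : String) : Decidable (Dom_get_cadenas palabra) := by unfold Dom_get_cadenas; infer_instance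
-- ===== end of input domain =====

-- B builds each suffix by slicing the original string directly instead of A's concatenation onto the previous element (objective: alternative decomposition).

-- ===== PORT A =====
-- strings are handled as List Char (PySem convention); 'c + cadenas[len(cadenas) - 1]' is cons onto the last element
def get_cadenas (palabra : String) : List String :=
  ((palabra.toList.reverse).foldl
      (fun cadenas c =>
        if cadenas.isEmpty then
          cadenas ++ [[c]]
        else
          cadenas ++ [c :: PySem.List.pyGetD cadenas (PySem.List.len cadenas - 1) []])
      ([] : List (List Char))).map String.ofList

-- ===== PORT B =====
def get_cadenas_alt (palabra : String) : List String :=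
  let cs := palabra.toList
  let n : Int := PySem.List.len cs
  (PySem.List.pyRange 0 n 1).map (fun i => String.ofList (PySem.List.slice cs (some (n - 1 - i)) none))

-- ===== PRECONDITION & SPEC =====
def Spec_get_cadenas (palabra : String) (out : List String) : Prop := out = get_cadenas_alt palabra
instance (palabra : String) (out : List String) : Decidable (Spec_get_cadenas palabra out) := by unfold Spec_get_cadenas; infer_instance

-- ===== CLAIM (what is proved, stated in full; the proofs are below) =====
def Claim_equal_get_cadenas : Prop := ∀ (palabra : String), Dom_get_cadenas palabra → Spec_get_cadenas palabra (get_cadenas palabra)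

-- ===== LEMMAS AND PROOFS =====

-- the list A's loop appends after the initial state: each element is the next char consed onto the previous one
def pvBuild (s : List Char) : List Char → List (List Char)
  | [] => []
  | c :: t => (c :: s) :: pvBuild (c :: s) t

theorem pvFoldl_eq_build (rs : List Char) :
    ∀ (acc : List (List Char)) (s : List Char), acc.getLast? = some s →
    rs.foldl
      (fun cadenas c =>
        if cadenas.isEmpty then cadenas ++ [[c]]
        else cadenas ++ [c :: PySem.List.pyGetD cadenas (PySem.List.len cadenas - 1) []])
      acc = acc ++ pvBuild s rs := by
  induction rs with
  | nil => intro acc s _; simp [pvBuild]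
  | cons c t ih =>
    intro acc s hs
    have hne : acc ≠ [] := by intro h; simp [h] at hs
    have hempty : acc.isEmpty = false := by simpa [List.isEmpty_iff] using hne
    have hlast : PySem.List.pyGetD acc (PySem.List.len acc - 1) [] = s := by
      have hlen : 0 < acc.length := List.length_pos_iff.mpr hne
      have h1 : acc[acc.length - 1]? = some s := by
        rw [← List.getLast?_eq_getElem?]; exact hs
      rw [PySem.List.len_eq,
        PySem.List.pyGetD_eq_getElem acc [] (by omega) (by omega)]
      have ht : ((acc.length : Int) - 1).toNat = acc.length - 1 := by omega
      obtain ⟨h2, h3⟩ := List.getElem?_eq_some_iff.mp h1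
      simpa [ht] using h3
    simp only [List.foldl_cons, hempty, Bool.false_eq_true, if_false, hlast]
    rw [ih (acc ++ [c :: s]) (c :: s) (by simp)]
    simp [pvBuild]

theorem pvBuild_eq_map (rs : List Char) :
    ∀ s, pvBuild s rs = (List.range rs.length).map (fun i => (rs.take (i + 1)).reverse ++ s) := by
  induction rs with
  | nil => intro s; simp [pvBuild]
  | cons c t ih =>
    intro s
    simp only [pvBuild, ih (c :: s), List.length_cons, List.range_succ_eq_map,
      List.map_cons, List.map_map]
    refine congrArg₂ List.cons (by simp) ?_
    apply List.map_congr_left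
    intro i _
    simp [Function.comp, List.take_succ_cons]

theorem get_cadenas_spec' (palabra : String) :
    get_cadenas palabra = get_cadenas_alt palabra := by
  unfold get_cadenas get_cadenas_alt
  dsimp only
  rcases hrs : palabra.toList.reverse with _ | ⟨c, t⟩
  · have hnil : palabra.toList = [] := by simpa using congrArg List.reverse hrs
    simp [hnil]
  · have hfold :
        (c :: t).foldl
          (fun cadenas c =>
            if cadenas.isEmpty then cadenas ++ [[c]]
            else cadenas ++ [c :: PySem.List.pyGetD cadenas (PySem.List.len cadenas - 1) []])
          [] = pvBuild [] (c :: t) := by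
      simp only [List.foldl_cons, List.isEmpty_nil, if_true, List.nil_append]
      rw [pvFoldl_eq_build t [[c]] [c] (by simp)]
      simp [pvBuild]
    have hn : (c :: t).length = palabra.toList.length := by
      have := congrArg List.length hrs; simpa using this.symm
    rw [hfold, pvBuild_eq_map, hn]
    rw [PySem.List.len_eq, PySem.List.pyRange_one]
    have hcast : ((palabra.toList.length : Int) - 0).toNat = palabra.toList.length := by omega
    rw [hcast]
    simp only [List.map_map]
    apply List.map_congr_left
    intro i hi
    simp only [List.mem_range] at hi
    simp only [Function.comp]
    congr 1
    have hidx : (palabra.toList.length : Int) - 1 - (0 + (i : Int)) =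
        ((palabra.toList.length - 1 - i : Nat) : Int) := by omega
    rw [hidx, PySem.List.slice_from_natCast, ← hrs, List.take_reverse,
      List.reverse_reverse, List.append_nil]
    congr 1
    omega

-- ===== VERDICT (by name: the statement is the Claim_ definition above) =====
theorem get_cadenas_spec : Claim_equal_get_cadenas := by
  intro palabra _
  exact get_cadenas_spec' palabra
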